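-- pv_equiv track=rewrite | github.com/weykko/algorithms-tbank | contest 3/B.py | is_balanced_and_bst
-- ===== SOURCE A (Python) =====
-- def is_balanced_and_bst(tree, node):
--     if node == -1:
--         return True, 1
--
--     left, right = tree[node]
--
--     if left >= node or (right <= node and right != -1):
--         return False, 0
--
--     left_is_avl, left_height = is_balanced_and_bst(tree, left)
--     right_is_avl, right_height = is_balanced_and_bst(tree, right)
--
--     if not left_is_avl or not right_is_avl:
--         return False, 0
--
--     if abs(left_height - right_height) > 1:
--         return False, 0
--
--     height = max(left_height, right_height) + 1
--     return True, height
-- ===== SOURCE B (Python) =====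
-- def is_balanced_and_bst(tree, node):
--     # Iterative post-order DFS with an explicit stack and a height memo
--     # (None marks an invalid subtree) instead of recursion.
--     memo = {-1: 1}
--     stack = [node]
--     while stack:
--         cur = stack[-1]
--         if cur in memo:
--             stack.pop()
--             continue
--         left, right = tree[cur]
--         if left >= cur or (right <= cur and right != -1):
--             memo[cur] = None
--             stack.pop()
--             continue
--         if left not in memo:
--             stack.append(left)
--             continue
--         if right not in memo:
--             stack.append(right)
--             continue
--         lh, rh = memo[left], memo[right]
--         if lh is None or rh is None or abs(lh - rh) > 1:
--             memo[cur] = None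
--         else:
--             memo[cur] = max(lh, rh) + 1
--         stack.pop()
--     h = memo[node]
--     return (False, 0) if h is None else (True, h)
-- ===== Notes on version B (the rewrite author's own statement) =====
-- stated objective: alternative
-- what changed: Replaced the recursive post-order validation with an iterative DFS that keeps an explicit stack of pending nodes and a memo dict of computed subtree heights (None = invalid subtree), reading the root's memo entry at the end.
import Mathlib
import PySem

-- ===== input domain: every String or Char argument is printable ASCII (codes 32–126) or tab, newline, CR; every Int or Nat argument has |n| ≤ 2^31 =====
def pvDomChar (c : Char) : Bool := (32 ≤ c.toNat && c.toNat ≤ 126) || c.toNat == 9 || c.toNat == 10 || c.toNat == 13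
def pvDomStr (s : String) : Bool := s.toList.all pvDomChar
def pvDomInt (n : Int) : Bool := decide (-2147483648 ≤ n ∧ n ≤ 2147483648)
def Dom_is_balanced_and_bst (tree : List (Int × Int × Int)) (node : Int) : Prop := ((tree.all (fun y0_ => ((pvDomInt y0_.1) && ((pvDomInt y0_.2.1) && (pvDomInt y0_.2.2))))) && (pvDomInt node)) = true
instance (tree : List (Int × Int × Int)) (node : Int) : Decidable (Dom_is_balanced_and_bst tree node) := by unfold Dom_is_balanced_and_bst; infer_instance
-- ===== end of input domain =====

-- B replaces A's recursive post-order validation by an iterative DFS with an explicit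
-- stack and a memo dict of subtree heights (none = invalid subtree): an alternative,
-- non-recursive formulation of the same check (no speed claim).

-- ===== PORT A =====
-- tree is a Python dict[int, (int, int)]; lookup = first match in the association list
def pvLook (tree : List (Int × Int × Int)) (k : Int) : Option (Int × Int) :=
  (PySem.Dict.mk tree).get? k

-- fuel-guarded transliteration of A's recursion; none = exception (KeyError /
-- RecursionError), never reached under Pre_ (fuel 2*tree.length+2 bounds the depth there)
def goA (tree : List (Int × Int × Int)) : Nat → Int → Option (Bool × Int)
  | 0, _ => none
  | fuel+1, node =>
    if node = -1 then some (true, 1)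
    else
      match pvLook tree node with
      | none => none
      | some (left, right) =>
        if left ≥ node ∨ (right ≤ node ∧ right ≠ -1) then some (false, 0)
        else
          match goA tree fuel left, goA tree fuel right with
          | some (la, lh), some (ra, rh) =>
            if ¬la ∨ ¬ra then some (false, 0)
            else if (lh - rh).natAbs > 1 then some (false, 0)
            else some (true, max lh rh + 1)
          | _, _ => none

def is_balanced_and_bst (tree : List (Int × Int × Int)) (node : Int) : Bool × Int :=
  (goA tree (2 * tree.length + 2) node).getD (false, 0)

-- ===== PORT B =====
-- fuel-guarded transliteration of B's while-loop; state = (memo, stack); none = exception /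
-- fuel out, never reached under Pre_ (6*tree.length+4 bounds the iteration count there)
def runB (tree : List (Int × Int × Int)) :
    Nat → PySem.Dict Int (Option Int) → List Int → Option (PySem.Dict Int (Option Int))
  | 0, _, _ => none
  | _+1, memo, [] => some memo
  | fuel+1, memo, cur :: rest =>
    match memo.get? cur with
    | some _ => runB tree fuel memo rest
    | none =>
      match pvLook tree cur with
      | none => none
      | some (left, right) =>
        if left ≥ cur ∨ (right ≤ cur ∧ right ≠ -1) then
          runB tree fuel (memo.insert cur none) rest
        else
          match memo.get? left with
          | none => runB tree fuel memo (left :: cur :: rest)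
          | some lv =>
            match memo.get? right with
            | none => runB tree fuel memo (right :: cur :: rest)
            | some rv =>
              match lv, rv with
              | some lh, some rh =>
                if (lh - rh).natAbs > 1 then runB tree fuel (memo.insert cur none) rest
                else runB tree fuel (memo.insert cur (some (max lh rh + 1))) rest
              | _, _ => runB tree fuel (memo.insert cur none) rest

def is_balanced_and_bst_alt (tree : List (Int × Int × Int)) (node : Int) : Bool × Int :=
  match runB tree (6 * tree.length + 4) (PySem.Dict.empty.insert (-1) (some 1)) [node] with
  | none => (false, 0)
  | some memo =>
    match memo.get? node with
    | some (some h) => (true, h)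
    | _ => (false, 0)

-- ===== PRECONDITION & SPEC =====
-- pvGoodB: the per-node ordering check A performs before descending
def pvGoodB (k l r : Int) : Bool := decide (l < k ∧ (k < r ∨ r = -1))
-- pvChild: the children A actually descends into from key k (none on a failed or bad lookup)
def pvChild (tree : List (Int × Int × Int)) (k : Int) : List Int :=
  match pvLook tree k with
  | some (l, r) =>
    if pvGoodB k l r then (if l = -1 then [] else [l]) ++ (if r = -1 then [] else [r]) else []
  | none => []
-- one breadth step of graph reachability over the child links
def pvStep (tree : List (Int × Int × Int)) (s : List Int) : List Int :=
  (s ++ s.flatMap (pvChild tree)).dedup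
def pvIter (tree : List (Int × Int × Int)) : Nat → List Int → List Int
  | 0, s => s
  | n+1, s => pvStep tree (pvIter tree n s)
-- enough iterations to reach the fixed point (all sets live in {start} ∪ pvU tree)
def pvF (tree : List (Int × Int × Int)) : Nat := 2 * tree.length + 3
-- the set of keys A's recursion visits when started at node
def pvReach (tree : List (Int × Int × Int)) (node : Int) : List Int :=
  pvIter tree (pvF tree) [node]
-- Pre_ excludes exactly the inputs on which the Python A raises: a key reachable through
-- the order-passing child links is missing from the dict (KeyError), or a cycle among
-- those links is reachable (RecursionError); A returns normally on every other input.
def Pre_is_balanced_and_bst (tree : List (Int × Int × Int)) (node : Int) : Prop :=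
  node = -1 ∨
    ((∀ k ∈ pvReach tree node, (pvLook tree k).isSome = true) ∧
     (∀ k ∈ pvReach tree node, k ∉ pvIter tree (pvF tree) (pvChild tree k)))
instance (tree : List (Int × Int × Int)) (node : Int) : Decidable (Pre_is_balanced_and_bst tree node) := by
  unfold Pre_is_balanced_and_bst; infer_instance

def pvWitness_is_balanced_and_bst : (List (Int × Int × Int)) × Int :=
  ([(1, 0, 2), (0, -1, -1), (2, -1, -1)], 1)

def Spec_is_balanced_and_bst (tree : List (Int × Int × Int)) (node : Int) (out : Bool × Int) : Prop := out = is_balanced_and_bst_alt tree node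
instance (tree : List (Int × Int × Int)) (node : Int) (out : Bool × Int) : Decidable (Spec_is_balanced_and_bst tree node out) := by unfold Spec_is_balanced_and_bst; infer_instance

-- ===== CLAIM (what is proved, stated in full; the proofs are below) =====
def Claim_equal_is_balanced_and_bst : Prop := ∀ (tree : List (Int × Int × Int)) (node : Int), Dom_is_balanced_and_bst tree node → Pre_is_balanced_and_bst tree node → Spec_is_balanced_and_bst tree node (is_balanced_and_bst tree node)

-- ===== LEMMAS AND PROOFS =====

theorem pvLook_mem {tree : List (Int × Int × Int)} {k : Int} {v : Int × Int}
    (h : pvLook tree k = some v) : (k, v) ∈ tree := by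
  induction tree with
  | nil => simp [pvLook, PySem.Dict.get?] at h
  | cons e t ih =>
    rw [pvLook] at h
    obtain ⟨a, b⟩ := e
    rw [PySem.Dict.get?_mk_cons] at h
    by_cases hk : a = k
    · subst hk
      simp at h
      subst h; exact List.mem_cons_self ..
    · simp [hk] at h
      exact List.mem_cons_of_mem _ (ih (by rw [pvLook]; exact h))

-- ----- reachability toolkit -----

-- all child values occurring in the dict (a universe bound for reachability)
def pvU (tree : List (Int × Int × Int)) : List Int := tree.flatMap (fun e => [e.2.1, e.2.2])

theorem mem_pvStep {tree : List (Int × Int × Int)} {s : List Int} {x : Int} :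
    x ∈ pvStep tree s ↔ x ∈ s ∨ ∃ y ∈ s, x ∈ pvChild tree y := by
  simp [pvStep]

theorem pvStep_nodup (tree : List (Int × Int × Int)) (s : List Int) :
    (pvStep tree s).Nodup := List.nodup_dedup _

theorem subset_pvStep {tree : List (Int × Int × Int)} {s : List Int} :
    s ⊆ pvStep tree s := fun _ hx => mem_pvStep.2 (Or.inl hx)

theorem subset_pvIter {tree : List (Int × Int × Int)} {s : List Int} :
    ∀ n, s ⊆ pvIter tree n s := by
  intro n
  induction n with
  | zero => exact fun _ h => h
  | succ n ih => exact fun x hx => subset_pvStep (ih hx)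

theorem pvIter_nodup {tree : List (Int × Int × Int)} {s : List Int} (hn : s.Nodup) :
    ∀ n, (pvIter tree n s).Nodup := by
  intro n
  cases n with
  | zero => exact hn
  | succ n => exact pvStep_nodup ..

theorem pvChild_some {tree : List (Int × Int × Int)} {k l r : Int}
    (h : pvLook tree k = some (l, r)) :
    pvChild tree k =
      (if pvGoodB k l r then (if l = -1 then [] else [l]) ++ (if r = -1 then [] else [r]) else []) := by
  unfold pvChild; rw [h]

theorem pvChild_none {tree : List (Int × Int × Int)} {k : Int}
    (h : pvLook tree k = none) : pvChild tree k = [] := by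
  unfold pvChild; rw [h]

theorem pvChild_sub_pvU {tree : List (Int × Int × Int)} {k x : Int}
    (h : x ∈ pvChild tree k) : x ∈ pvU tree := by
  cases hlk : pvLook tree k with
  | none => rw [pvChild_none hlk] at h; simp at h
  | some p =>
    obtain ⟨l, r⟩ := p
    rw [pvChild_some hlk] at h
    have hm : (k, l, r) ∈ tree := pvLook_mem hlk
    have hx : x = l ∨ x = r := by
      by_cases hg : pvGoodB k l r = true
      · rw [if_pos hg] at h
        rcases List.mem_append.1 h with h1 | h1
        · left; by_cases hc : l = (-1 : Int) <;> simp [hc] at h1 <;> simp_all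
        · right; by_cases hc : r = (-1 : Int) <;> simp [hc] at h1 <;> simp_all
      · rw [if_neg hg] at h; simp at h
    simp only [pvU, List.mem_flatMap]
    exact ⟨(k, l, r), hm, by rcases hx with rfl | rfl <;> simp⟩

theorem pvIter_sub_pvU {tree : List (Int × Int × Int)} {s : List Int} :
    ∀ n, ∀ x ∈ pvIter tree n s, x ∈ s ++ pvU tree := by
  intro n
  induction n with
  | zero => intro x hx; exact List.mem_append.2 (Or.inl hx)
  | succ n ih =>
    intro x hx
    rcases mem_pvStep.1 hx with h | ⟨y, _, hc⟩
    · exact ih x h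
    · exact List.mem_append.2 (Or.inr (pvChild_sub_pvU hc))

theorem pvIter_len {tree : List (Int × Int × Int)} {s : List Int} (n : Nat) :
    (pvIter tree (n+1) s).length ≤ (s ++ pvU tree).dedup.length := by
  have hsub : pvIter tree (n+1) s ⊆ (s ++ pvU tree).dedup :=
    fun x hx => List.mem_dedup.2 (pvIter_sub_pvU (n+1) x hx)
  exact ((pvStep_nodup tree _).subperm hsub).length_le

theorem pvGrow (tree : List (Int × Int × Int)) (s : List Int) (hn : s.Nodup) :
    ∀ n : Nat, (∃ m, m ≤ n ∧ ∀ x ∈ pvStep tree (pvIter tree m s), x ∈ pvIter tree m s) ∨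
      n + s.length ≤ (pvIter tree n s).length := by
  intro n
  induction n with
  | zero => right; simp [pvIter]
  | succ n ih =>
    rcases ih with ⟨m, hm, hcl⟩ | hlen
    · exact Or.inl ⟨m, Nat.le_succ_of_le hm, hcl⟩
    · by_cases hcl : ∀ x ∈ pvStep tree (pvIter tree n s), x ∈ pvIter tree n s
      · exact Or.inl ⟨n, Nat.le_succ n, hcl⟩
      · right
        push_neg at hcl
        obtain ⟨x, hxs, hxn⟩ := hcl
        have hnod : (pvIter tree n s).Nodup := pvIter_nodup hn n
        have hsub : x :: pvIter tree n s ⊆ pvIter tree (n+1) s := by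
          intro z hz
          rcases List.mem_cons.1 hz with rfl | hz
          · exact hxs
          · exact subset_pvStep hz
        have hsp := ((List.nodup_cons.2 ⟨hxn, hnod⟩).subperm hsub).length_le
        simp at hsp
        omega

theorem pvStable {tree : List (Int × Int × Int)} {s : List Int} {m : Nat}
    (hcl : ∀ x ∈ pvStep tree (pvIter tree m s), x ∈ pvIter tree m s) :
    ∀ k x, x ∈ pvIter tree (m + k) s ↔ x ∈ pvIter tree m s := by
  intro k
  induction k with
  | zero => intro x; rfl
  | succ k ih =>
    intro x
    constructor
    · intro hx
      have hx' : x ∈ pvStep tree (pvIter tree (m + k) s) := hx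
      rcases mem_pvStep.1 hx' with h | ⟨y, hy, hc⟩
      · exact (ih x).1 h
      · exact hcl x (mem_pvStep.2 (Or.inr ⟨y, (ih y).1 hy, hc⟩))
    · intro hx
      exact subset_pvStep ((ih x).2 hx)

theorem pvIter_closed {tree : List (Int × Int × Int)} {s : List Int} {F : Nat}
    (hn : s.Nodup) (hF : (s ++ pvU tree).dedup.length + 1 ≤ F) :
    ∀ x ∈ pvStep tree (pvIter tree F s), x ∈ pvIter tree F s := by
  rcases pvGrow tree s hn F with ⟨m, hm, hcl⟩ | hlen
  · have hst := pvStable hcl (F - m)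
    have e : m + (F - m) = F := by omega
    rw [e] at hst
    intro x hx
    rcases mem_pvStep.1 hx with h | ⟨y, hy, hc⟩
    · exact h
    · exact (hst x).2 (hcl x (mem_pvStep.2 (Or.inr ⟨y, (hst y).1 hy, hc⟩)))
  · exfalso
    have hF1 : 1 ≤ F := by omega
    obtain ⟨F', rfl⟩ : ∃ F', F = F' + 1 := ⟨F - 1, by omega⟩
    have hb := pvIter_len (tree := tree) (s := s) F'
    omega

theorem pvU_length (tree : List (Int × Int × Int)) : (pvU tree).length = 2 * tree.length := by
  induction tree with
  | nil => rfl
  | cons e t ih => simp [pvU, List.flatMap_cons] at ih ⊢; omega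

theorem pvF_ok_node (tree : List (Int × Int × Int)) (node : Int) :
    ([node] ++ pvU tree).dedup.length + 1 ≤ pvF tree := by
  have h1 := (List.dedup_sublist ([node] ++ pvU tree)).length_le
  have h4 : ([node] ++ pvU tree).length = 1 + (pvU tree).length := by simp; omega
  have h2 := pvU_length tree
  unfold pvF
  omega

theorem pvChild_length_le (tree : List (Int × Int × Int)) (k : Int) :
    (pvChild tree k).length ≤ 2 := by
  cases hlk : pvLook tree k with
  | none => rw [pvChild_none hlk]; simp
  | some p =>
    obtain ⟨l, r⟩ := p
    rw [pvChild_some hlk]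
    split_ifs <;> simp

theorem pvF_ok_child (tree : List (Int × Int × Int)) (k : Int) :
    (pvChild tree k ++ pvU tree).dedup.length + 1 ≤ pvF tree := by
  have h1 := (List.dedup_sublist (pvChild tree k ++ pvU tree)).length_le
  have h4 : (pvChild tree k ++ pvU tree).length = (pvChild tree k).length + (pvU tree).length := by
    simp
  have h2 := pvU_length tree
  have h3 := pvChild_length_le tree k
  unfold pvF
  omega

theorem pvChild_nodup (tree : List (Int × Int × Int)) (k : Int) :
    (pvChild tree k).Nodup := by
  cases hlk : pvLook tree k with
  | none => rw [pvChild_none hlk]; simp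
  | some p =>
    obtain ⟨l, r⟩ := p
    rw [pvChild_some hlk]
    by_cases hg : pvGoodB k l r = true
    · rw [if_pos hg]
      simp only [pvGoodB, decide_eq_true_eq] at hg
      by_cases hl : l = -1 <;> by_cases hr : r = -1 <;> simp [hl, hr]
      omega
    · rw [if_neg hg]; simp

theorem pvReach_closed {tree : List (Int × Int × Int)} {node x c : Int}
    (hx : x ∈ pvReach tree node) (hc : c ∈ pvChild tree x) : c ∈ pvReach tree node :=
  pvIter_closed (List.nodup_singleton node) (pvF_ok_node tree node) c
    (mem_pvStep.2 (Or.inr ⟨x, hx, hc⟩))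

theorem pvReach_self (tree : List (Int × Int × Int)) (node : Int) :
    node ∈ pvReach tree node := subset_pvIter _ (List.mem_singleton.2 rfl)

theorem pvReach_length (tree : List (Int × Int × Int)) (node : Int) :
    (pvReach tree node).length ≤ 2 * tree.length + 1 := by
  have h1 := pvIter_len (tree := tree) (s := [node]) (2 * tree.length + 2)
  have h2 := (List.dedup_sublist ([node] ++ pvU tree)).length_le
  have h4 : ([node] ++ pvU tree).length = 1 + (pvU tree).length := by simp; omega
  have h3 := pvU_length tree
  have he : pvReach tree node = pvIter tree (2 * tree.length + 2 + 1) [node] := rfl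
  rw [he]
  omega

-- ----- good edges, paths and the cycle argument -----

def pvGoodEdge (tree : List (Int × Int × Int)) (a b : Int) : Prop :=
  ∃ l r, pvLook tree a = some (l, r) ∧ pvGoodB a l r = true ∧ (b = l ∨ b = r) ∧ b ≠ -1

inductive pvRel (tree : List (Int × Int × Int)) : Int → Int → Prop
  | refl (a : Int) : pvRel tree a a
  | head {a b c : Int} : pvGoodEdge tree a b → pvRel tree b c → pvRel tree a c

theorem pvEdge_child {tree : List (Int × Int × Int)} {a b : Int}
    (h : pvGoodEdge tree a b) : b ∈ pvChild tree a := by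
  obtain ⟨l, r, hlk, hg, hb, hne⟩ := h
  rw [pvChild_some hlk, if_pos hg]
  rcases hb with rfl | rfl
  · exact List.mem_append.2 (Or.inl (by simp [hne]))
  · exact List.mem_append.2 (Or.inr (by simp [hne]))

theorem pvRel_snoc {tree : List (Int × Int × Int)} {a b c : Int}
    (h : pvRel tree a b) (hbc : pvGoodEdge tree b c) : pvRel tree a c := by
  induction h with
  | refl => exact .head hbc (.refl _)
  | head h1 _ ih => exact .head h1 (ih hbc)

theorem pvRel_iter {tree : List (Int × Int × Int)} {s : List Int} {F : Nat} {a b : Int}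
    (hn : s.Nodup) (hF : (s ++ pvU tree).dedup.length + 1 ≤ F)
    (ha : a ∈ pvIter tree F s) (hr : pvRel tree a b) : b ∈ pvIter tree F s := by
  induction hr with
  | refl => exact ha
  | head h1 _ ih =>
    exact ih (pvIter_closed hn hF _ (mem_pvStep.2 (Or.inr ⟨_, ha, pvEdge_child h1⟩)))

theorem pvChain_rel {tree : List (Int × Int × Int)} :
    ∀ {l : List Int} {a m : Int}, List.IsChain (pvGoodEdge tree) l → a ∈ l →
      l.getLast? = some m → pvRel tree a m := by
  intro l
  induction l with
  | nil => intro a m _ ha _; simp at ha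
  | cons x t ih =>
    intro a m hch ha hlast
    cases t with
    | nil =>
      simp at ha hlast
      subst ha
      rw [hlast]
      exact .refl _
    | cons y t' =>
      obtain ⟨hxy, hch'⟩ := List.isChain_cons.1 hch
      have hlast' : (y :: t').getLast? = some m := by
        rw [List.getLast?_cons_cons] at hlast; exact hlast
      rcases List.mem_cons.1 ha with rfl | ha'
      · exact .head (hxy y rfl) (ih hch' (List.mem_cons_self ..) hlast')
      · exact ih hch' ha' hlast'

def pvPathOK (tree : List (Int × Int × Int)) (node : Int) (path : List Int) (m : Int) : Prop :=
  (path ++ [m]).Nodup ∧ (∀ v ∈ path ++ [m], v ∈ pvReach tree node) ∧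
  List.IsChain (pvGoodEdge tree) (path ++ [m]) ∧ (path ++ [m]).head? = some node

theorem pvExtend {tree : List (Int × Int × Int)} {node : Int} {path : List Int} {m c : Int}
    (hacy : ∀ k ∈ pvReach tree node, k ∉ pvIter tree (pvF tree) (pvChild tree k))
    (hp : pvPathOK tree node path m) (he : pvGoodEdge tree m c) :
    pvPathOK tree node (path ++ [m]) c := by
  obtain ⟨hnd, hmem, hch, hhd⟩ := hp
  have hmS : m ∈ pvReach tree node := hmem m (by simp)
  have hcS : c ∈ pvReach tree node := pvReach_closed hmS (pvEdge_child he)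
  have hfresh : c ∉ path ++ [m] := by
    intro hcmem
    have hlast : (path ++ [m]).getLast? = some m := List.getLast?_concat
    have hrel : pvRel tree c m := pvChain_rel hch hcmem hlast
    apply hacy c hcS
    cases hrel with
    | refl => exact subset_pvIter _ (pvEdge_child he)
    | head hedge hrel' =>
      have hxc : pvRel tree _ c := pvRel_snoc hrel' he
      exact pvRel_iter (pvChild_nodup tree c) (pvF_ok_child tree c)
        (subset_pvIter _ (pvEdge_child hedge)) hxc
  refine ⟨?_, ?_, ?_, ?_⟩
  · rw [List.nodup_append]
    refine ⟨hnd, List.nodup_singleton c, ?_⟩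
    intro x hx y hy
    have hyc : y = c := by simpa using hy
    subst hyc
    intro hxe
    subst hxe
    exact hfresh hx
  · intro v hv
    rcases List.mem_append.1 hv with hv | hv
    · exact hmem v hv
    · simp at hv; subst hv; exact hcS
  · refine List.IsChain.append hch (by simp) ?_
    intro x hx y hy
    simp at hy; subst hy
    rw [List.getLast?_concat] at hx
    simp at hx; subst hx
    exact he
  · rw [List.head?_append, hhd]; rfl

-- ----- facts about A's recursion -----

def pvToOpt (res : Bool × Int) : Option Int := if res.1 then some res.2 else none

def pvCoh (tree : List (Int × Int × Int)) (memo : PySem.Dict Int (Option Int)) : Prop :=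
  ∀ x v, memo.get? x = some v → ∃ d res, goA tree d x = some res ∧ v = pvToOpt res

def pvKeysOK (tree : List (Int × Int × Int)) (node : Int)
    (memo : PySem.Dict Int (Option Int)) : Prop :=
  ∀ x ∈ memo.keys, x = -1 ∨ x ∈ pvReach tree node

theorem goA_mono {tree : List (Int × Int × Int)} :
    ∀ (d : Nat) {m : Int} {res : Bool × Int},
      goA tree d m = some res → goA tree (d + 1) m = some res := by
  intro d
  induction d with
  | zero => intro m res h; simp [goA] at h
  | succ f ih =>
    intro m res h
    rw [goA] at h
    rw [goA]
    by_cases hm : m = -1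
    · simpa [hm] using h
    · simp only [if_neg hm] at h ⊢
      cases hlk : pvLook tree m with
      | none => rw [hlk] at h; simp at h
      | some p =>
        obtain ⟨l, r⟩ := p
        rw [hlk] at h
        simp only at h ⊢
        by_cases hbad : l ≥ m ∨ (r ≤ m ∧ r ≠ -1)
        · simp only [if_pos hbad] at h ⊢; exact h
        · simp only [if_neg hbad] at h ⊢
          cases hl : goA tree f l with
          | none => rw [hl] at h; simp at h
          | some resL =>
            cases hr : goA tree f r with
            | none => rw [hl, hr] at h; obtain ⟨la, lh⟩ := resL; simp at h
            | some resR =>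
              rw [hl, hr] at h
              rw [ih hl, ih hr]
              exact h

theorem goA_le {tree : List (Int × Int × Int)} {d d' : Nat} {m : Int} {res : Bool × Int}
    (hle : d ≤ d') (h : goA tree d m = some res) : goA tree d' m = some res := by
  induction d' with
  | zero => cases Nat.le_zero.1 hle; exact h
  | succ f ih =>
    rcases Nat.lt_or_ge d (f + 1) with hlt | hge
    · exact goA_mono f (ih (Nat.lt_succ_iff.1 hlt))
    · have : d = f + 1 := Nat.le_antisymm hle hge
      rw [← this]; exact h

theorem goA_false {tree : List (Int × Int × Int)} {d : Nat} {m : Int} {res : Bool × Int}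
    (h : goA tree d m = some res) (hf : res.1 = false) : res.2 = 0 := by
  cases d with
  | zero => simp [goA] at h
  | succ f =>
    rw [goA] at h
    by_cases hm : m = -1
    · simp [hm] at h; rw [← h] at hf; simp at hf
    · simp only [if_neg hm] at h
      cases hlk : pvLook tree m with
      | none => rw [hlk] at h; simp at h
      | some p =>
        obtain ⟨l, r⟩ := p
        rw [hlk] at h
        simp only at h
        by_cases hbad : l ≥ m ∨ (r ≤ m ∧ r ≠ -1)
        · simp only [if_pos hbad] at h
          rw [← Option.some_inj.1 h]
        · simp only [if_neg hbad] at h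
          cases hl : goA tree f l with
          | none => rw [hl] at h; simp at h
          | some resL =>
            cases hr : goA tree f r with
            | none => rw [hl, hr] at h; obtain ⟨la, lh⟩ := resL; simp at h
            | some resR =>
              rw [hl, hr] at h
              obtain ⟨la, lh⟩ := resL
              obtain ⟨ra, rh⟩ := resR
              simp only at h
              by_cases hv : ¬la ∨ ¬ra
              · simp only [if_pos hv] at h; rw [← Option.some_inj.1 h]
              · simp only [if_neg hv] at h
                by_cases hab : (lh - rh).natAbs > 1
                · simp only [if_pos hab] at h; rw [← Option.some_inj.1 h]
                · simp only [if_neg hab] at h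
                  rw [← Option.some_inj.1 h] at hf
                  simp at hf

theorem pvCoh_val {tree : List (Int × Int × Int)} {memo : PySem.Dict Int (Option Int)}
    {x : Int} {v : Option Int} {d : Nat} {res : Bool × Int}
    (hc : pvCoh tree memo) (h : memo.get? x = some v) (hg : goA tree d x = some res) :
    v = pvToOpt res := by
  obtain ⟨d', res', hg', hv⟩ := hc x v h
  have h1 : goA tree (max d d') x = some res := goA_le (Nat.le_max_left ..) hg
  have h2 : goA tree (max d d') x = some res' := goA_le (Nat.le_max_right ..) hg'
  rw [h1] at h2
  rw [hv, Option.some_inj.1 h2]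

theorem pvMem_pvChild_of {tree : List (Int × Int × Int)} {m l r c : Int}
    (hlk : pvLook tree m = some (l, r)) (hg : pvGoodB m l r = true)
    (hc : c = l ∨ c = r) (hne : c ≠ -1) : pvGoodEdge tree m c := ⟨l, r, hlk, hg, hc, hne⟩

theorem suffA {tree : List (Int × Int × Int)} {node : Int}
    (hLook : ∀ k ∈ pvReach tree node, (pvLook tree k).isSome = true)
    (hacy : ∀ k ∈ pvReach tree node, k ∉ pvIter tree (pvF tree) (pvChild tree k)) :
    ∀ (d : Nat) (m : Int) (path : List Int),
      pvPathOK tree node path m →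
      2 * tree.length + 2 ≤ d + path.length →
      (goA tree d m).isSome = true := by
  intro d
  induction d with
  | zero =>
    intro m path hp hlen
    exfalso
    have hsub : (path ++ [m]).Subperm (pvReach tree node) :=
      List.Nodup.subperm hp.1 (fun v hv => hp.2.1 v hv)
    have h1 := hsub.length_le
    have h2 := pvReach_length tree node
    simp at h1
    omega
  | succ f ih =>
    intro m path hp hlen
    have hmS : m ∈ pvReach tree node := hp.2.1 m (by simp)
    have hplen : path.length + 1 ≤ 2 * tree.length + 1 := by
      have hsub : (path ++ [m]).Subperm (pvReach tree node) :=
        List.Nodup.subperm hp.1 (fun v hv => hp.2.1 v hv)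
      have h1 := hsub.length_le
      have h2 := pvReach_length tree node
      simp at h1
      omega
    rw [goA]
    by_cases hm : m = -1
    · simp [hm]
    · simp only [if_neg hm]
      obtain ⟨⟨l, r⟩, hlk⟩ := Option.isSome_iff_exists.1 (hLook m hmS)
      rw [hlk]
      by_cases hbad : l ≥ m ∨ (r ≤ m ∧ r ≠ -1)
      · simp [hbad]
      · simp only [if_neg hbad]
        have hgood : pvGoodB m l r = true := by
          simp [pvGoodB]; omega
        have hchild : ∀ c : Int, (c = l ∨ c = r) → (goA tree f c).isSome = true := by
          intro c hc
          by_cases hc1 : c = -1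
          · subst hc1
            have hf1 : 1 ≤ f := by omega
            obtain ⟨f', rfl⟩ := Nat.exists_eq_add_of_le hf1
            rw [Nat.add_comm, goA]
            simp
          · have hp' : pvPathOK tree node (path ++ [m]) c :=
              pvExtend hacy hp (pvMem_pvChild_of hlk hgood hc hc1)
            have hlen' : 2 * tree.length + 2 ≤ f + (path ++ [m]).length := by
              simp; omega
            exact ih c (path ++ [m]) hp' hlen'
        obtain ⟨⟨la, lh⟩, hl⟩ := Option.isSome_iff_exists.1 (hchild l (Or.inl rfl))
        obtain ⟨⟨ra, rh⟩, hr⟩ := Option.isSome_iff_exists.1 (hchild r (Or.inr rfl))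
        rw [hl, hr]
        by_cases hv : la = false ∨ ra = false
        · simp [hv]
        · by_cases hab : 1 < (lh - rh).natAbs <;> simp [hv, hab]

-- ----- facts about B's loop -----

def pvCombine (lv rv : Option Int) : Option Int :=
  match lv, rv with
  | some lh, some rh => if (lh - rh).natAbs > 1 then none else some (max lh rh + 1)
  | _, _ => none

theorem pvCombine_goA {la ra : Bool} {lh rh : Int} {res : Bool × Int}
    (h : (if ¬la = true ∨ ¬ra = true then some ((false : Bool), (0 : Int))
          else if (lh - rh).natAbs > 1 then some (false, 0)
          else some (true, max lh rh + 1)) = some res) :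
    pvCombine (pvToOpt (la, lh)) (pvToOpt (ra, rh)) = pvToOpt res := by
  cases la with
  | false =>
    simp only [pvToOpt, pvCombine] at h ⊢
    simp at h
    rw [← h]
    simp
  | true =>
    cases ra with
    | false =>
      simp only [pvToOpt, pvCombine] at h ⊢
      simp at h
      rw [← h]
      simp
    | true =>
      simp only [pvToOpt] at h ⊢
      simp at h
      by_cases hab : 1 < (lh - rh).natAbs
      · simp [hab] at h
        rw [← h]
        simp [pvCombine, hab]
      · simp [hab] at h
        rw [← h]
        simp [pvCombine, hab]

theorem pvSize_keys {ν : Type} (d : PySem.Dict Int ν) : d.size = d.keys.length := by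
  simp [PySem.Dict.size, PySem.Dict.keys]

theorem pvSize_insert_new {ν : Type} {d : PySem.Dict Int ν} {m : Int} {v : ν}
    (h : d.get? m = none) : (d.insert m v).size = d.size + 1 := by
  rw [PySem.Dict.size_insert]
  rw [if_neg]
  rw [PySem.Dict.contains_eq_isSome_get?, h]
  simp

theorem runB_done (tree : List (Int × Int × Int)) (fuel : Nat) (memo : PySem.Dict Int (Option Int)) :
    runB tree (fuel + 1) memo [] = some memo := by
  rw [runB]

theorem runB_pop {tree : List (Int × Int × Int)} {fuel : Nat}
    {memo : PySem.Dict Int (Option Int)} {cur : Int} {rest : List Int} {v : Option Int}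
    (h : memo.get? cur = some v) :
    runB tree (fuel + 1) memo (cur :: rest) = runB tree fuel memo rest := by
  rw [runB, h]

theorem runB_bad {tree : List (Int × Int × Int)} {fuel : Nat}
    {memo : PySem.Dict Int (Option Int)} {cur l r : Int} {rest : List Int}
    (h : memo.get? cur = none) (hlk : pvLook tree cur = some (l, r))
    (hbad : l ≥ cur ∨ (r ≤ cur ∧ r ≠ -1)) :
    runB tree (fuel + 1) memo (cur :: rest) = runB tree fuel (memo.insert cur none) rest := by
  rw [runB, h, hlk]
  simp only [if_pos hbad]

theorem runB_pushL {tree : List (Int × Int × Int)} {fuel : Nat}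
    {memo : PySem.Dict Int (Option Int)} {cur l r : Int} {rest : List Int}
    (h : memo.get? cur = none) (hlk : pvLook tree cur = some (l, r))
    (hbad : ¬(l ≥ cur ∨ (r ≤ cur ∧ r ≠ -1))) (hl : memo.get? l = none) :
    runB tree (fuel + 1) memo (cur :: rest) = runB tree fuel memo (l :: cur :: rest) := by
  rw [runB, h, hlk]
  simp only [if_neg hbad, hl]

theorem runB_pushR {tree : List (Int × Int × Int)} {fuel : Nat}
    {memo : PySem.Dict Int (Option Int)} {cur l r : Int} {rest : List Int} {lv : Option Int}
    (h : memo.get? cur = none) (hlk : pvLook tree cur = some (l, r))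
    (hbad : ¬(l ≥ cur ∨ (r ≤ cur ∧ r ≠ -1))) (hl : memo.get? l = some lv)
    (hr : memo.get? r = none) :
    runB tree (fuel + 1) memo (cur :: rest) = runB tree fuel memo (r :: cur :: rest) := by
  rw [runB, h, hlk]
  simp only [if_neg hbad, hl, hr]

theorem runB_comp {tree : List (Int × Int × Int)} {fuel : Nat}
    {memo : PySem.Dict Int (Option Int)} {cur l r : Int} {rest : List Int} {lv rv : Option Int}
    (h : memo.get? cur = none) (hlk : pvLook tree cur = some (l, r))
    (hbad : ¬(l ≥ cur ∨ (r ≤ cur ∧ r ≠ -1))) (hl : memo.get? l = some lv)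
    (hr : memo.get? r = some rv) :
    runB tree (fuel + 1) memo (cur :: rest) =
      runB tree fuel (memo.insert cur (pvCombine lv rv)) rest := by
  rw [runB, h, hlk]
  simp only [if_neg hbad, hl, hr]
  cases lv with
  | none => rfl
  | some lh =>
    cases rv with
    | none => rfl
    | some rh =>
      simp only [pvCombine]
      by_cases hab : (lh - rh).natAbs > 1
      · simp only [if_pos hab]
      · simp only [if_neg hab]

theorem runSim {tree : List (Int × Int × Int)} {node : Int}
    (hacy : ∀ k ∈ pvReach tree node, k ∉ pvIter tree (pvF tree) (pvChild tree k)) :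
    ∀ (d : Nat) (m : Int) (path : List Int) (memo : PySem.Dict Int (Option Int)) (res : Bool × Int),
      pvPathOK tree node path m →
      goA tree d m = some res →
      pvCoh tree memo → memo.get? (-1) = some (some 1) → pvKeysOK tree node memo →
      memo.keys.Nodup →
      (∀ v ∈ m :: path, memo.get? v = none) →
      ∃ (k : Nat) (memo' : PySem.Dict Int (Option Int)),
        (∀ fuel, runB tree (fuel + k) memo (m :: path.reverse) = runB tree fuel memo' path.reverse) ∧
        pvCoh tree memo' ∧ memo'.get? (-1) = some (some 1) ∧ pvKeysOK tree node memo' ∧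
        memo'.keys.Nodup ∧
        memo'.get? m = some (pvToOpt res) ∧
        (∀ x v, memo.get? x = some v → memo'.get? x = some v) ∧
        (∀ v ∈ path, memo'.get? v = none) ∧
        memo.size + 1 ≤ memo'.size ∧ k + 2 ≤ 3 * (memo'.size - memo.size) := by
  intro d
  induction d with
  | zero => intro m path memo res _ hres; simp [goA] at hres
  | succ f ih =>
    intro m path memo res hp hres hcoh hneg1 hko hknd hfresh
    have hmm : memo.get? m = none := hfresh m (by simp)
    have hm_ne : m ≠ -1 := by
      intro he; rw [he] at hmm; rw [hmm] at hneg1; simp at hneg1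
    have hmk : m ∈ pvReach tree node := hp.2.1 m (by simp)
    have hmnotp : m ∉ path := by
      have := hp.1
      rw [List.nodup_append] at this
      intro hmem
      exact this.2.2 m hmem m (by simp) rfl
    rw [goA] at hres
    simp only [if_neg hm_ne] at hres
    cases hlk : pvLook tree m with
    | none => rw [hlk] at hres; simp at hres
    | some p =>
      obtain ⟨l, r⟩ := p
      rw [hlk] at hres
      simp only at hres
      -- the value inserted for m is pvToOpt res in every branch below
      have hins_common : ∀ (memoN : PySem.Dict Int (Option Int)),
          pvCoh tree memoN → memoN.get? (-1) = some (some 1) → pvKeysOK tree node memoN →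
          memoN.keys.Nodup → (∀ v ∈ path, memoN.get? v = none) → memoN.get? m = none →
          pvCoh tree (memoN.insert m (pvToOpt res)) ∧
          (memoN.insert m (pvToOpt res)).get? (-1) = some (some 1) ∧
          pvKeysOK tree node (memoN.insert m (pvToOpt res)) ∧
          (memoN.insert m (pvToOpt res)).keys.Nodup ∧
          (memoN.insert m (pvToOpt res)).get? m = some (pvToOpt res) ∧
          (∀ v ∈ path, (memoN.insert m (pvToOpt res)).get? v = none) ∧
          (memoN.insert m (pvToOpt res)).size = memoN.size + 1 := by
        intro memoN hcohN hneg1N hkoN hkndN hfreshN hmN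
        refine ⟨?_, ?_, ?_, ?_, ?_, ?_, ?_⟩
        · intro x v hx
          rw [PySem.Dict.get?_insert] at hx
          by_cases hxm : x = m
          · rw [if_pos hxm] at hx
            subst hxm
            exact ⟨f + 1, res, by rw [goA]; simp only [if_neg hm_ne]; rw [hlk]; exact hres,
              (Option.some_inj.1 hx).symm⟩
          · rw [if_neg hxm] at hx
            exact hcohN x v hx
        · rw [PySem.Dict.get?_insert, if_neg (by omega : (-1 : Int) ≠ m)]
          exact hneg1N
        · intro x hx
          rcases (PySem.Dict.mem_keys_insert ..).1 hx with hx | hx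
          · subst hx; exact Or.inr hmk
          · exact hkoN x hx
        · exact PySem.Dict.nodup_keys_insert _ _ _ hkndN
        · exact PySem.Dict.get?_insert_self ..
        · intro v hv
          rw [PySem.Dict.get?_insert, if_neg (by intro he; subst he; exact hmnotp hv)]
          exact hfreshN v hv
        · exact pvSize_insert_new hmN
      by_cases hbad : l ≥ m ∨ (r ≤ m ∧ r ≠ -1)
      · -- order violation: one iteration, memoise none
        simp only [if_pos hbad] at hres
        have hres' : res = (false, 0) := (Option.some_inj.1 hres).symm
        have hto : pvToOpt res = none := by rw [hres']; rfl
        obtain ⟨c1, c2, c3, c4, c5, c6, c7⟩ :=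
          hins_common memo hcoh hneg1 hko hknd
            (fun v hv => hfresh v (List.mem_cons_of_mem _ hv)) hmm
        refine ⟨1, memo.insert m (pvToOpt res), ?_, c1, c2, c3, c4, c5, ?_, c6, ?_, ?_⟩
        · intro fuel
          rw [runB_bad hmm hlk hbad]
          rw [hto]
        · intro x v hx
          rw [PySem.Dict.get?_insert, if_neg (by intro he; subst he; rw [hmm] at hx; simp at hx)]
          exact hx
        · omega
        · omega
      · -- descend into both children
        simp only [if_neg hbad] at hres
        have hgood : pvGoodB m l r = true := by simp [pvGoodB]; omega
        cases hgl : goA tree f l with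
        | none => rw [hgl] at hres; simp at hres
        | some resL =>
          cases hgr : goA tree f r with
          | none => rw [hgl, hgr] at hres; obtain ⟨la, lh⟩ := resL; simp at hres
          | some resR =>
            rw [hgl, hgr] at hres
            obtain ⟨la, lh⟩ := resL
            obtain ⟨ra, rh⟩ := resR
            have hcomb : pvCombine (pvToOpt (la, lh)) (pvToOpt (ra, rh)) = pvToOpt res :=
              pvCombine_goA hres
            have hrev : (path ++ [m]).reverse = m :: path.reverse := by simp
            have hchild : ∀ c : Int, (c = l ∨ c = r) → c ≠ -1 →
                pvPathOK tree node (path ++ [m]) c := by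
              intro c hc hc1
              exact pvExtend hacy hp (pvMem_pvChild_of hlk hgood hc hc1)
            cases hml : memo.get? l with
            | none =>
              -- left child fresh: push it and resolve its subtree first
              have hlne : l ≠ -1 := by
                intro he; rw [he] at hml; rw [hneg1] at hml; simp at hml
              have hpl := hchild l (Or.inl rfl) hlne
              have hfreshl : ∀ v ∈ l :: (path ++ [m]), memo.get? v = none := by
                intro v hv
                rcases List.mem_cons.1 hv with hv | hv
                · subst hv; exact hml
                · rcases List.mem_append.1 hv with hv | hv
                  · exact hfresh v (List.mem_cons_of_mem _ hv)
                  · simp at hv; subst hv; exact hmm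
              obtain ⟨kl, memo1, heq1, hcoh1, hneg11, hko1, hknd1, hgetl1, hmono1, hfresh1, hsz1, hk1⟩ :=
                ih l (path ++ [m]) memo (la, lh) hpl hgl hcoh hneg1 hko hknd hfreshl
              have hm1 : memo1.get? m = none := hfresh1 m (by simp)
              cases hmr1 : memo1.get? r with
              | none =>
                -- right child fresh too
                have hrne : r ≠ -1 := by
                  intro he; rw [he] at hmr1; rw [hneg11] at hmr1; simp at hmr1
                have hpr := hchild r (Or.inr rfl) hrne
                have hfreshr : ∀ v ∈ r :: (path ++ [m]), memo1.get? v = none := by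
                  intro v hv
                  rcases List.mem_cons.1 hv with hv | hv
                  · subst hv; exact hmr1
                  · exact hfresh1 v hv
                obtain ⟨kr, memo2, heq2, hcoh2, hneg12, hko2, hknd2, hgetr2, hmono2, hfresh2, hsz2, hk2⟩ :=
                  ih r (path ++ [m]) memo1 (ra, rh) hpr hgr hcoh1 hneg11 hko1 hknd1 hfreshr
                have hm2 : memo2.get? m = none := hfresh2 m (by simp)
                have hl2 : memo2.get? l = some (pvToOpt (la, lh)) := hmono2 l _ hgetl1
                obtain ⟨c1, c2, c3, c4, c5, c6, c7⟩ :=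
                  hins_common memo2 hcoh2 hneg12 hko2 hknd2
                    (fun v hv => hfresh2 v (List.mem_append.2 (Or.inl hv))) hm2
                refine ⟨kl + kr + 3, memo2.insert m (pvToOpt res), ?_, c1, c2, c3, c4, c5, ?_, c6, ?_, ?_⟩
                · intro fuel
                  have e1 : fuel + (kl + kr + 3) = (fuel + kr + 2 + kl) + 1 := by omega
                  rw [e1, runB_pushL hmm hlk hbad hml]
                  have e2 : l :: m :: path.reverse = l :: (path ++ [m]).reverse := by rw [hrev]
                  rw [e2, heq1 (fuel + kr + 2), hrev]
                  have e3 : fuel + kr + 2 = (fuel + 1 + kr) + 1 := by omega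
                  rw [e3, runB_pushR hm1 hlk hbad hgetl1 hmr1]
                  have e4 : r :: m :: path.reverse = r :: (path ++ [m]).reverse := by rw [hrev]
                  rw [e4, heq2 (fuel + 1), hrev]
                  rw [runB_comp hm2 hlk hbad hl2 hgetr2, hcomb]
                · intro x v hx
                  have hx2 := hmono2 x v (hmono1 x v hx)
                  rw [PySem.Dict.get?_insert, if_neg (by
                    intro he; subst he; rw [hmm] at hx; simp at hx)]
                  exact hx2
                · omega
                · omega
              | some rv =>
                -- right child already memoised (coherently)
                have hrv : rv = pvToOpt (ra, rh) := pvCoh_val hcoh1 hmr1 hgr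
                obtain ⟨c1, c2, c3, c4, c5, c6, c7⟩ :=
                  hins_common memo1 hcoh1 hneg11 hko1 hknd1
                    (fun v hv => hfresh1 v (List.mem_append.2 (Or.inl hv))) hm1
                refine ⟨kl + 2, memo1.insert m (pvToOpt res), ?_, c1, c2, c3, c4, c5, ?_, c6, ?_, ?_⟩
                · intro fuel
                  have e1 : fuel + (kl + 2) = ((fuel + 1) + kl) + 1 := by omega
                  rw [e1, runB_pushL hmm hlk hbad hml]
                  have e2 : l :: m :: path.reverse = l :: (path ++ [m]).reverse := by rw [hrev]
                  rw [e2, heq1 (fuel + 1), hrev]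
                  rw [runB_comp hm1 hlk hbad hgetl1 hmr1, hrv, hcomb]
                · intro x v hx
                  have hx1 := hmono1 x v hx
                  rw [PySem.Dict.get?_insert, if_neg (by
                    intro he; subst he; rw [hmm] at hx; simp at hx)]
                  exact hx1
                · omega
                · omega
            | some lv =>
              -- left child already memoised (coherently)
              have hlv : lv = pvToOpt (la, lh) := pvCoh_val hcoh hml hgl
              cases hmr : memo.get? r with
              | none =>
                have hrne : r ≠ -1 := by
                  intro he; rw [he] at hmr; rw [hneg1] at hmr; simp at hmr
                have hpr := hchild r (Or.inr rfl) hrne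
                have hfreshr : ∀ v ∈ r :: (path ++ [m]), memo.get? v = none := by
                  intro v hv
                  rcases List.mem_cons.1 hv with hv | hv
                  · subst hv; exact hmr
                  · rcases List.mem_append.1 hv with hv | hv
                    · exact hfresh v (List.mem_cons_of_mem _ hv)
                    · simp at hv; subst hv; exact hmm
                obtain ⟨kr, memo2, heq2, hcoh2, hneg12, hko2, hknd2, hgetr2, hmono2, hfresh2, hsz2, hk2⟩ :=
                  ih r (path ++ [m]) memo (ra, rh) hpr hgr hcoh hneg1 hko hknd hfreshr
                have hm2 : memo2.get? m = none := hfresh2 m (by simp)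
                have hl2 : memo2.get? l = some lv := hmono2 l _ hml
                obtain ⟨c1, c2, c3, c4, c5, c6, c7⟩ :=
                  hins_common memo2 hcoh2 hneg12 hko2 hknd2
                    (fun v hv => hfresh2 v (List.mem_append.2 (Or.inl hv))) hm2
                refine ⟨kr + 2, memo2.insert m (pvToOpt res), ?_, c1, c2, c3, c4, c5, ?_, c6, ?_, ?_⟩
                · intro fuel
                  have e1 : fuel + (kr + 2) = ((fuel + 1) + kr) + 1 := by omega
                  rw [e1, runB_pushR hmm hlk hbad hml hmr]
                  have e2 : r :: m :: path.reverse = r :: (path ++ [m]).reverse := by rw [hrev]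
                  rw [e2, heq2 (fuel + 1), hrev]
                  rw [runB_comp hm2 hlk hbad hl2 hgetr2, hlv, hcomb]
                · intro x v hx
                  have hx2 := hmono2 x v hx
                  rw [PySem.Dict.get?_insert, if_neg (by
                    intro he; subst he; rw [hmm] at hx; simp at hx)]
                  exact hx2
                · omega
                · omega
              | some rv =>
                -- both children already memoised: a single compute-and-pop iteration
                have hrv : rv = pvToOpt (ra, rh) := pvCoh_val hcoh hmr hgr
                obtain ⟨c1, c2, c3, c4, c5, c6, c7⟩ :=
                  hins_common memo hcoh hneg1 hko hknd
                    (fun v hv => hfresh v (List.mem_cons_of_mem _ hv)) hmm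
                refine ⟨1, memo.insert m (pvToOpt res), ?_, c1, c2, c3, c4, c5, ?_, c6, ?_, ?_⟩
                · intro fuel
                  rw [runB_comp hmm hlk hbad hml hmr, hlv, hrv, hcomb]
                · intro x v hx
                  rw [PySem.Dict.get?_insert, if_neg (by
                    intro he; subst he; rw [hmm] at hx; simp at hx)]
                  exact hx
                · omega
                · omega

theorem pvMemo0_get (x : Int) :
    (PySem.Dict.empty.insert (-1 : Int) (some (1 : Int))).get? x =
      if x = -1 then some (some 1) else none := by
  rw [PySem.Dict.get?_insert]
  by_cases hx : x = -1
  · simp [hx]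
  · simp [hx, PySem.Dict.get?_empty]

-- ===== VERDICT (by name: the statement is the Claim_ definition above) =====
theorem is_balanced_and_bst_spec : Claim_equal_is_balanced_and_bst := by
  unfold Claim_equal_is_balanced_and_bst Spec_is_balanced_and_bst
  intro tree node _ hpre
  unfold is_balanced_and_bst is_balanced_and_bst_alt
  by_cases hm : node = -1
  · subst hm
    have eA : 2 * tree.length + 2 = (2 * tree.length + 1) + 1 := by omega
    have hA : goA tree (2 * tree.length + 2) (-1) = some (true, 1) := by
      rw [eA, goA]; simp
    rw [hA]
    have hmemget : (PySem.Dict.empty.insert (-1 : Int) (some (1 : Int))).get? (-1) = some (some 1) :=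
      PySem.Dict.get?_insert_self ..
    have e1 : 6 * tree.length + 4 = (6 * tree.length + 2) + 1 + 1 := by omega
    rw [e1, runB_pop hmemget, runB_done]
    simp [hmemget]
  · rcases hpre with he | ⟨hLook, hacy⟩
    · exact absurd he hm
    have hget0 : (PySem.Dict.empty.insert (-1 : Int) (some (1 : Int))).get? node = none := by
      rw [pvMemo0_get, if_neg hm]
    have hpok : pvPathOK tree node [] node := by
      refine ⟨by simp, ?_, by simp, by simp⟩
      intro v hv
      have hvn : v = node := by simpa using hv
      rw [hvn]
      exact pvReach_self tree node
    have hsome := suffA hLook hacy (2 * tree.length + 2) node [] hpok (by simp)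
    obtain ⟨res, hres⟩ := Option.isSome_iff_exists.1 hsome
    have hcoh0 : pvCoh tree (PySem.Dict.empty.insert (-1 : Int) (some (1 : Int))) := by
      intro x v hx
      rw [pvMemo0_get] at hx
      by_cases hx1 : x = -1
      · rw [if_pos hx1] at hx
        subst hx1
        refine ⟨1, (true, 1), by rw [goA]; simp, ?_⟩
        rw [← Option.some_inj.1 hx]
        rfl
      · rw [if_neg hx1] at hx
        simp at hx
    have hneg10 : (PySem.Dict.empty.insert (-1 : Int) (some (1 : Int))).get? (-1) = some (some 1) :=
      PySem.Dict.get?_insert_self ..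
    have hko0 : pvKeysOK tree node (PySem.Dict.empty.insert (-1 : Int) (some (1 : Int))) := by
      intro x hx
      rcases (PySem.Dict.mem_keys_insert ..).1 hx with hx | hx
      · exact Or.inl hx
      · simp [PySem.Dict.keys_empty] at hx
    have hknd0 : (PySem.Dict.empty.insert (-1 : Int) (some (1 : Int))).keys.Nodup :=
      PySem.Dict.nodup_keys_insert _ _ _ PySem.Dict.nodup_keys_empty
    have hfresh0 : ∀ v ∈ node :: ([] : List Int),
        (PySem.Dict.empty.insert (-1 : Int) (some (1 : Int))).get? v = none := by
      intro v hv
      simp at hv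
      subst hv
      exact hget0
    obtain ⟨k, memo', heq, hcoh', hneg1', hko', hknd', hgetm, hmono, hfreshp, hszlow, hkbound⟩ :=
      runSim hacy (2 * tree.length + 2) node [] (PySem.Dict.empty.insert (-1 : Int) (some (1 : Int))) res
        hpok hres hcoh0 hneg10 hko0 hknd0 hfresh0
    have hsub : memo'.keys ⊆ (-1) :: pvReach tree node := by
      intro x hx
      rcases hko' x hx with h | h
      · simp [h]
      · exact List.mem_cons_of_mem _ h
    have hsz' : memo'.size ≤ 2 * tree.length + 2 := by
      rw [pvSize_keys]
      have h1 := (List.Nodup.subperm hknd' hsub).length_le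
      have h2 := pvReach_length tree node
      simp at h1
      omega
    have hsz0 : (PySem.Dict.empty.insert (-1 : Int) (some (1 : Int))).size = 1 := by
      rw [pvSize_insert_new (PySem.Dict.get?_empty _), PySem.Dict.size_empty]
    rw [hsz0] at hszlow hkbound
    have hkle : k + 3 ≤ 6 * tree.length + 4 := by omega
    have e2 : 6 * tree.length + 4 = (6 * tree.length + 4 - k - 1) + 1 + k := by omega
    have heqF := heq (6 * tree.length + 4 - k - 1 + 1)
    simp only [List.reverse_nil] at heqF
    rw [e2, heqF, runB_done]
    rw [hres]
    obtain ⟨b, h⟩ := res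
    cases b with
    | false =>
      have h0 : ((false : Bool), h).2 = 0 := goA_false hres rfl
      simp at h0
      subst h0
      simp [hgetm, pvToOpt]
    | true =>
      simp [hgetm, pvToOpt]
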